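-- pv_equiv track=rewrite | github.com/Abiradar2/Clemenger-BBDO-internship- | app.py | prompt_search_stub
-- ===== SOURCE A (Python) =====
-- from typing import List, Dict, Optional, Tuple
--
-- def prompt_search_stub(q: str, pool: List[Dict]) -> List[Dict]:
--     """Very simple placeholder: match any word in caption/desc."""
--     if not q:
--         return pool
--     toks = [t for t in q.lower().split() if t]
--     def _ok(m: Dict) -> bool:
--         hay = (m.get("caption","") + " " + m.get("description","")).lower()
--         return any(t in hay for t in toks)
--     return [m for m in pool if _ok(m)]
-- ===== SOURCE B (Python) =====
-- # B: alternative decomposition — token-major staged passes over a precomputed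
-- # haystack list with a boolean mark array, instead of A's item-major closure.
-- from typing import List, Dict
--
-- def prompt_search_stub(q: str, pool: List[Dict]) -> List[Dict]:
--     if not q:
--         return pool
--     toks = [t for t in q.lower().split() if t]
--     hays = [(m.get("caption", "") + " " + m.get("description", "")).lower() for m in pool]
--     keep = [False] * len(pool)
--     for t in toks:
--         for i, h in enumerate(hays):
--             if t in h:
--                 keep[i] = True
--     return [m for m, k in zip(pool, keep) if k]
-- ===== Notes on version B (the rewrite author's own statement) =====
-- stated objective: alternative
-- what changed: Inverts the loop nesting: instead of A's item-major pass calling a per-item any-token closure, B precomputes all haystacks in one pass, then makes one token-major sweep per token over a boolean mark array, and finally gathers the marked items by zipping pool with the marks.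
import Mathlib
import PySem

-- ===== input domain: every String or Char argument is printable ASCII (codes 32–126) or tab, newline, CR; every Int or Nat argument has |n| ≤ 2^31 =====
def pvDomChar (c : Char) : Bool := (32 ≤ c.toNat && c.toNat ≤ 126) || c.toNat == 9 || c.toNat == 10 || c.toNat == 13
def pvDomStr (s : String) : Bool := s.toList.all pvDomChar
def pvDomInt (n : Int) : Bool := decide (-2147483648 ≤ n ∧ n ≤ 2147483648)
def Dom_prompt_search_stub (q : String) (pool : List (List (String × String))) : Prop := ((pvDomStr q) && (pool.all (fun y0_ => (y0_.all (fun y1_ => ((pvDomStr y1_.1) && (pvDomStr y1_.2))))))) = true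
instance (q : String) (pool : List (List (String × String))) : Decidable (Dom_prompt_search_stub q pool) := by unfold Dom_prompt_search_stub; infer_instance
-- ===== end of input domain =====

-- B inverts the loop nesting: precomputed haystack list, one token-major sweep per token
-- over a boolean mark array, then a final gather of the marked items — same results.


-- ===== PORT A =====
-- hay = (m.get("caption","") + " " + m.get("description","")).lower(), on the List Char side
def pvHay (m : List (String × String)) : List Char :=
  PySem.Chars.lower
    ((((PySem.Dict.mk m).getD "caption" "").toList) ++ ' ' :: (((PySem.Dict.mk m).getD "description" "").toList))

-- A's inner helper _ok: any(t in hay for t in toks)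
def pvOk (toks : List String) (m : List (String × String)) : Bool :=
  toks.any (fun t => PySem.Chars.isIn t.toList (pvHay m))

def prompt_search_stub (q : String) (pool : List (List (String × String))) : List (List (String × String)) :=
  if q == "" then pool
  else pool.filter (pvOk ((PySem.Str.split₀ (PySem.Str.lower q)).filter (fun t => !(t == ""))))

-- ===== PORT B =====
-- one token-major sweep: keep[i] := keep[i] or (t in hays[i]) for every i
def pvSweep (t : String) (keep : List Bool) (hays : List (List Char)) : List Bool :=
  keep.zipWith (fun k h => k || PySem.Chars.isIn t.toList h) hays

def prompt_search_stub_alt (q : String) (pool : List (List (String × String))) : List (List (String × String)) :=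
  if q == "" then pool
  else
    let toks := (PySem.Str.split₀ (PySem.Str.lower q)).filter (fun t => !(t == ""))
    let hays := pool.map pvHay
    let keep := toks.foldl (fun acc t => pvSweep t acc hays) (List.replicate pool.length false)
    ((pool.zip keep).filter (fun p => p.2)).map (fun p => p.1)

-- ===== PRECONDITION & SPEC =====
def Spec_prompt_search_stub (q : String) (pool : List (List (String × String))) (out : List (List (String × String))) : Prop := out = prompt_search_stub_alt q pool
instance (q : String) (pool : List (List (String × String))) (out : List (List (String × String))) : Decidable (Spec_prompt_search_stub q pool out) := by unfold Spec_prompt_search_stub; infer_instance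

-- ===== CLAIM (what is proved, stated in full; the proofs are below) =====
def Claim_equal_prompt_search_stub : Prop := ∀ (q : String) (pool : List (List (String × String))), Dom_prompt_search_stub q pool → Spec_prompt_search_stub q pool (prompt_search_stub q pool)

-- ===== LEMMAS AND PROOFS =====

-- one sweep over a mark array of the form hays.map g just or-s the token's test into g
theorem pvSweep_map {g : List Char → Bool} (t : String) (hays : List (List Char)) :
    pvSweep t (hays.map g) hays = hays.map (fun h => g h || PySem.Chars.isIn t.toList h) := by
  induction hays with
  | nil => rfl
  | cons h hs ih => simp [pvSweep] at ih ⊢; exact ih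

-- the whole token loop turns the mark array hays.map g into the any-token marks
theorem pvFold_sweep (toks : List String) (g : List Char → Bool) (hays : List (List Char)) :
    toks.foldl (fun acc t => pvSweep t acc hays) (hays.map g)
      = hays.map (fun h => g h || toks.any (fun t => PySem.Chars.isIn t.toList h)) := by
  induction toks generalizing g with
  | nil => simp
  | cons t ts ih =>
      rw [List.foldl_cons, pvSweep_map, ih]
      simp [Bool.or_assoc]

-- gathering by zipping a list with the map of a predicate over it is just filtering
theorem pvZip_filter_map {α : Type} (f : α → Bool) (l : List α) :
    ((l.zip (l.map f)).filter (fun p => p.2)).map (fun p => p.1) = l.filter f := by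
  induction l with
  | nil => rfl
  | cons x xs ih =>
      by_cases hx : f x <;> simp [hx, ih]

-- ===== VERDICT (by name: the statement is the Claim_ definition above) =====
theorem prompt_search_stub_spec : Claim_equal_prompt_search_stub := by
  intro q pool _
  unfold Spec_prompt_search_stub prompt_search_stub prompt_search_stub_alt
  by_cases hq : q == ""
  · simp [hq]
  · simp only [hq, Bool.false_eq_true, if_false]
    have hrep : List.replicate pool.length false
        = (pool.map pvHay).map (fun _ => false) := by
      simp [List.map_const']
    rw [hrep, pvFold_sweep]
    simp only [Bool.false_or, List.map_map]
    rw [pvZip_filter_map]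
    rfl
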